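-- pv_equiv track=rewrite | github.com/andrewdget/TasKey | CommandFunctions.py | ComKey
-- ===== SOURCE A (Python) =====
-- def ComKey(input_string):
-- 	''' accepts input ("command") string with multiple "markers", composed of a
-- 	"-" and single letter, followed by an optional string atribute, and outputs
-- 	a dictionary of marker/attribute pairs ('command_pairs') '''
-- 	markerindex = []
-- 	command_pairs = {}
-- 	nochars = len(input_string)
-- 	for i in range(nochars): # get index of markers
-- 		if input_string[i] == '-':
-- 			markerindex.append(i)
-- 	nomarker = len(markerindex)
-- 	for i in range(nomarker): # get markers and attributes (if they exist)
-- 		marker = input_string[markerindex[i]:markerindex[i]+2]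
-- 		if i == nomarker-1: # if last marker/at end of input string
-- 			attribute = input_string[markerindex[i]+3:nochars] # !! Not sure why 'nochars-1' cuts off last char...
-- 		else: # not last marker/at end of input string
-- 			attribute = input_string[markerindex[i]+3:markerindex[i+1]-1]
-- 		if attribute == '':
-- 			attribute = None
-- 		command_pairs.update({marker: attribute})
-- 	return command_pairs
-- ===== SOURCE B (Python) =====
-- def ComKey(input_string):
--     ''' same marker/attribute parse, done in one streaming pass:
--     no marker-index list, just the pending marker start position '''
--     command_pairs = {}
--     nochars = len(input_string)
--     prev = None
--     for i in range(nochars):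
--         if input_string[i] == '-':
--             if prev is not None:
--                 attribute = input_string[prev+3:i-1]
--                 command_pairs[input_string[prev:prev+2]] = attribute if attribute else None
--             prev = i
--     if prev is not None:
--         attribute = input_string[prev+3:nochars]
--         command_pairs[input_string[prev:prev+2]] = attribute if attribute else None
--     return command_pairs
-- ===== Notes on version B (the rewrite author's own statement) =====
-- stated objective: simpler
-- what changed: Replaced A's two-phase approach (first pass collecting a list of all marker indices, then an index-arithmetic loop slicing between consecutive collected indices) with a single streaming pass that keeps only the pending marker's start position and emits each marker/attribute pair when the next dash (or the end of the string) is reached.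
import Mathlib
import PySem

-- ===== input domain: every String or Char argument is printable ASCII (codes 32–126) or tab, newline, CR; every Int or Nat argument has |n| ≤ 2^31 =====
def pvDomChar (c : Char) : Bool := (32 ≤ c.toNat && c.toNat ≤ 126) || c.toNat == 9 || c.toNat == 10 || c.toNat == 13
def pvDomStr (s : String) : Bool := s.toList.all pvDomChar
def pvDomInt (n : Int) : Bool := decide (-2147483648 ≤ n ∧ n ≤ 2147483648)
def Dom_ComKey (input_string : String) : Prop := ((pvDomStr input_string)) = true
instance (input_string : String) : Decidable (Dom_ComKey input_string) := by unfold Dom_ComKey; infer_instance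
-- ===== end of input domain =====

-- B replaces A's two passes (collect all marker indices, then slice between them by index
-- arithmetic) by ONE streaming pass that keeps only the pending marker's position (objective: simpler).

-- ===== PORT A =====
-- the body of A's second loop (marker/attribute extraction for loop index i)
def ComKeyStep (input_string : String) (nochars : Int) (markerindex : List Int) (nomarker : Int)
    (d : PySem.Dict String (Option String)) (i : Int) : PySem.Dict String (Option String) :=
  -- markerindex[i] / markerindex[i+1]: always in range in A, so the pyGetD default 0 is never used
  let mi := PySem.List.pyGetD markerindex i 0
  let marker := PySem.Str.slice input_string (some mi) (some (mi + 2))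
  let attrib :=
    if i = nomarker - 1 then
      PySem.Str.slice input_string (some (mi + 3)) (some nochars)
    else
      PySem.Str.slice input_string (some (mi + 3))
        (some (PySem.List.pyGetD markerindex (i + 1) 0 - 1))
  let attrib : Option String := if attrib = "" then none else some attrib
  d.insert marker attrib

def ComKey (input_string : String) : List (String × Option String) :=
  let nochars : Int := PySem.Str.len input_string
  let markerindex : List Int :=
    (PySem.List.pyRange 0 nochars 1).foldl
      (fun acc i => if PySem.Str.pyGet? input_string i = some '-' then acc ++ [i] else acc) []
  let nomarker : Int := (markerindex.length : Int)
  let command_pairs : PySem.Dict String (Option String) :=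
    (PySem.List.pyRange 0 nomarker 1).foldl
      (ComKeyStep input_string nochars markerindex nomarker) PySem.Dict.empty
  command_pairs.items

-- ===== PORT B =====
-- the body of B's single streaming loop: state = (dict so far, pending marker position)
def ComKeyAltStep (input_string : String)
    (st : PySem.Dict String (Option String) × Option Int) (i : Int) :
    PySem.Dict String (Option String) × Option Int :=
  if PySem.Str.pyGet? input_string i = some '-' then
    match st.2 with
    | some prev =>
      let attrib := PySem.Str.slice input_string (some (prev + 3)) (some (i - 1))
      let attrib : Option String := if attrib = "" then none else some attrib
      (st.1.insert (PySem.Str.slice input_string (some prev) (some (prev + 2))) attrib, some i)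
    | none => (st.1, some i)
  else st

def ComKey_alt (input_string : String) : List (String × Option String) :=
  let nochars : Int := PySem.Str.len input_string
  let st :=
    (PySem.List.pyRange 0 nochars 1).foldl (ComKeyAltStep input_string)
      (PySem.Dict.empty, none)
  match st.2 with
  | none => st.1.items
  | some prev =>
    let attrib := PySem.Str.slice input_string (some (prev + 3)) (some nochars)
    let attrib : Option String := if attrib = "" then none else some attrib
    (st.1.insert (PySem.Str.slice input_string (some prev) (some (prev + 2))) attrib).items

-- ===== PRECONDITION & SPEC =====
def Spec_ComKey (input_string : String) (out : List (String × Option String)) : Prop := out = ComKey_alt input_string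
instance (input_string : String) (out : List (String × Option String)) : Decidable (Spec_ComKey input_string out) := by unfold Spec_ComKey; infer_instance

-- ===== CLAIM (what is proved, stated in full; the proofs are below) =====
def Claim_equal_ComKey : Prop := ∀ (input_string : String), Dom_ComKey input_string → Spec_ComKey input_string (ComKey input_string)

-- ===== LEMMAS AND PROOFS =====

-- the key (2-char marker) and attribute (slice converted to None if empty) at given positions
def pvKey (s : String) (m : Int) : String := PySem.Str.slice s (some m) (some (m + 2))
def pvAttr (s : String) (a b : Int) : Option String :=
  let t := PySem.Str.slice s (some a) (some b)
  if t = "" then none else some t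

-- the common spec: fold over the list of marker positions, each marker sliced up to
-- (next marker - 1), the last one up to n
def pvBuild (s : String) (n : Int) :
    List Int → PySem.Dict String (Option String) → PySem.Dict String (Option String)
  | [], d => d
  | [m], d => d.insert (pvKey s m) (pvAttr s (m + 3) n)
  | m :: m' :: rest, d =>
      pvBuild s n (m' :: rest) (d.insert (pvKey s m) (pvAttr s (m + 3) (m' - 1)))

-- all markers except the (still pending) last one
def pvBuildInner (s : String) :
    List Int → PySem.Dict String (Option String) → PySem.Dict String (Option String)
  | [], d => d
  | [_], d => d
  | m :: m' :: rest, d =>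
      pvBuildInner s (m' :: rest) (d.insert (pvKey s m) (pvAttr s (m + 3) (m' - 1)))

-- marker positions among indices < j
def pvMs (s : String) (j : Int) : List Int :=
  (PySem.List.pyRange 0 j 1).foldl
    (fun acc i => if PySem.Str.pyGet? s i = some '-' then acc ++ [i] else acc) []

theorem pvBuild_eq_inner (s : String) (n : Int) (ms : List Int)
    (d : PySem.Dict String (Option String)) :
    pvBuild s n ms d =
      match ms.getLast? with
      | none => pvBuildInner s ms d
      | some p => (pvBuildInner s ms d).insert (pvKey s p) (pvAttr s (p + 3) n) := by
  induction ms generalizing d with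
  | nil => simp [pvBuild, pvBuildInner]
  | cons m tl ih =>
    cases tl with
    | nil => simp [pvBuild, pvBuildInner]
    | cons m' rest => simpa [pvBuild, pvBuildInner] using ih _

theorem pvBuildInner_snoc (s : String) (ms : List Int) (x : Int)
    (d : PySem.Dict String (Option String)) :
    pvBuildInner s (ms ++ [x]) d =
      match ms.getLast? with
      | none => d
      | some p => (pvBuildInner s ms d).insert (pvKey s p) (pvAttr s (p + 3) (x - 1)) := by
  induction ms generalizing d with
  | nil => simp [pvBuildInner]
  | cons m tl ih =>
    cases tl with
    | nil => simp [pvBuildInner]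
    | cons m' rest => simpa [pvBuildInner] using ih _

-- shift a foldl over pyRange by one
theorem pvFoldl_pyRange_shift {α : Type} (a b : Int) (f : α → Int → α) (init : α) :
    (PySem.List.pyRange (a + 1) (b + 1) 1).foldl f init =
      (PySem.List.pyRange a b 1).foldl (fun acc j => f acc (j + 1)) init := by
  induction hn : (b - a).toNat generalizing a init with
  | zero =>
    rw [PySem.List.pyRange_one_eq_nil (by omega), PySem.List.pyRange_one_eq_nil (by omega)]
    rfl
  | succ k ih =>
    rw [PySem.List.pyRange_one_cons (by omega : a + 1 < b + 1),
        PySem.List.pyRange_one_cons (by omega : a < b)]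
    simp only [List.foldl_cons]
    exact ih (a + 1) _ (by omega)

-- xs[j+1] = tail[j] for a nonnegative index
theorem pvGetD_cons_succ (x : Int) (xs : List Int) (j : Int) (hj : 0 ≤ j) :
    PySem.List.pyGetD (x :: xs) (j + 1) 0 = PySem.List.pyGetD xs j 0 := by
  obtain ⟨k, rfl⟩ : ∃ k : Nat, j = (k : Int) := ⟨j.toNat, by omega⟩
  rw [show ((k : Int) + 1) = ((k + 1 : Nat) : Int) by push_cast; ring,
      PySem.List.pyGetD_natCast, PySem.List.pyGetD_natCast]
  rfl

-- A's indexed second loop equals the structural fold over the marker list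
theorem pvAfold_eq_build (s : String) (n : Int) (ms : List Int)
    (d : PySem.Dict String (Option String)) :
    (PySem.List.pyRange 0 (ms.length : Int) 1).foldl
      (ComKeyStep s n ms (ms.length : Int)) d = pvBuild s n ms d := by
  induction ms generalizing d with
  | nil => simp [pvBuild, PySem.List.pyRange_one_eq_nil]
  | cons m tl ih =>
    rw [PySem.List.pyRange_one_cons (by exact_mod_cast Nat.succ_pos tl.length)]
    simp only [List.foldl_cons]
    cases tl with
    | nil =>
      have h1 : ((([m] : List Int)).length : Int) = 1 := by simp
      rw [h1, PySem.List.pyRange_one_eq_nil (by omega)]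
      simp [ComKeyStep, pvBuild, pvKey, pvAttr, PySem.List.pyGetD_zero_cons]
    | cons m' rest =>
      have hlen : ((m :: m' :: rest).length : Int) = ((m' :: rest).length : Int) + 1 := by
        push_cast [List.length_cons]; ring
      have hstep : ComKeyStep s n (m :: m' :: rest) ((m :: m' :: rest).length : Int) d 0
          = d.insert (pvKey s m) (pvAttr s (m + 3) (m' - 1)) := by
        have h0 : ¬ ((0 : Int) = ((rest.length : Int)) + 1) := by omega
        have hget1 : PySem.List.pyGetD (m :: m' :: rest) 1 0 = m' := by
          have h := pvGetD_cons_succ m (m' :: rest) 0 le_rfl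
          rw [zero_add] at h
          rw [h, PySem.List.pyGetD_zero_cons]
        simp [ComKeyStep, pvKey, pvAttr, PySem.List.pyGetD_zero_cons, h0, hget1]
      rw [hstep, hlen, pvFoldl_pyRange_shift]
      have hcongr : ∀ (d' : PySem.Dict String (Option String)) (j : Int),
          j ∈ PySem.List.pyRange 0 (((m' :: rest).length : Int)) 1 →
          ComKeyStep s n (m :: m' :: rest) (((m' :: rest).length : Int) + 1) d' (j + 1)
          = ComKeyStep s n (m' :: rest) (((m' :: rest).length : Int)) d' j := by
        intro d' j hj
        rw [PySem.List.mem_pyRange_one] at hj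
        have e1 := pvGetD_cons_succ m (m' :: rest) j (by omega)
        have e2 := pvGetD_cons_succ m (m' :: rest) (j + 1) (by omega)
        have e3 : (j + 1 = ((m' :: rest).length : Int) + 1 - 1)
            ↔ (j = ((m' :: rest).length : Int) - 1) := by omega
        simp only [ComKeyStep, e1, e2, e3]
      rw [PySem.List.foldl_congr_mem _ _ _ _
        (fun d' j hj => hcongr d' j hj)]
      exact ih _

-- B's streaming loop invariant: dict of finished markers + the pending marker position
theorem pvBfold_inv (s : String) (j : Int) :
    (PySem.List.pyRange 0 j 1).foldl (ComKeyAltStep s) (PySem.Dict.empty, none)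
    = (pvBuildInner s (pvMs s j) PySem.Dict.empty, (pvMs s j).getLast?) := by
  by_cases hj : 0 < j
  · obtain ⟨k, rfl⟩ : ∃ k : Nat, j = (k : Int) := ⟨j.toNat, by omega⟩
    clear hj
    induction k with
    | zero => simp [pvMs, PySem.List.pyRange_one_eq_nil, pvBuildInner]
    | succ k ih =>
      have hsplit : ((k + 1 : Nat) : Int) = (k : Int) + 1 := by push_cast; ring
      rw [hsplit, PySem.List.pyRange_one_succ_right (by positivity)]
      have hms : pvMs s ((k : Int) + 1) =
          if PySem.Str.pyGet? s (k : Int) = some '-' then pvMs s (k : Int) ++ [(k : Int)]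
          else pvMs s (k : Int) := by
        unfold pvMs
        rw [PySem.List.pyRange_one_succ_right (by positivity), List.foldl_append]
        by_cases hc : PySem.Str.pyGet? s (k : Int) = some '-' <;> simp_all
      rw [List.foldl_append, ih]
      simp only [List.foldl_cons, List.foldl_nil, hms]
      by_cases hc : PySem.Str.pyGet? s (k : Int) = some '-'
      · simp only [ComKeyAltStep, if_pos hc]
        cases hlast : (pvMs s (k : Int)).getLast? with
        | none =>
          have hnil : pvMs s (k : Int) = [] := List.getLast?_eq_none_iff.mp hlast
          simp [hnil, pvBuildInner]
        | some p =>
          rw [pvBuildInner_snoc, hlast]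
          simp [pvKey, pvAttr]
      · simp only [ComKeyAltStep, if_neg hc]
  · unfold pvMs
    rw [PySem.List.pyRange_one_eq_nil (by omega)]
    simp [pvBuildInner]

-- ===== VERDICT (by name: the statement is the Claim_ definition above) =====
theorem ComKey_spec : Claim_equal_ComKey := by
  intro s _
  show ComKey s = ComKey_alt s
  simp only [ComKey, ComKey_alt]
  rw [show (PySem.List.pyRange 0 (PySem.Str.len s) 1).foldl
        (fun acc i => if PySem.Str.pyGet? s i = some '-' then acc ++ [i] else acc) []
      = pvMs s (PySem.Str.len s) from rfl]
  rw [pvBfold_inv s (PySem.Str.len s), pvAfold_eq_build, pvBuild_eq_inner]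
  cases (pvMs s (PySem.Str.len s)).getLast? with
  | none => rfl
  | some p => rfl
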